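-- pv_equiv track=rewrite | github.com/alejandroacevedo2305/Flux_v0 | releases/simv7.py | separar_por_conexion
-- ===== SOURCE A (Python) =====
-- from copy import deepcopy
--
-- def separar_por_conexion(original_dict):
--
--     # Create deep copies of the original dictionary
--     true_dict = deepcopy(original_dict)
--     false_dict = deepcopy(original_dict)
--
--     # Create lists of keys to remove
--     keys_to_remove_true = [key for key, value in true_dict.items() if value.get('conexion') is not True]
--     keys_to_remove_false = [key for key, value in false_dict.items() if value.get('conexion') is not False]
--
--     # Remove keys from the deep-copied dictionaries
--     for key in keys_to_remove_true:
--         del true_dict[key]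
--     for key in keys_to_remove_false:
--         del false_dict[key]
--     return true_dict, false_dict
-- ===== SOURCE B (Python) =====
-- from copy import deepcopy
--
-- def separar_por_conexion(original_dict):
--     true_dict = {}
--     false_dict = {}
--     for key, value in original_dict.items():
--         cond = value.get('conexion')
--         if cond is True:
--             true_dict[key] = deepcopy(value)
--         elif cond is False:
--             false_dict[key] = deepcopy(value)
--     return true_dict, false_dict
-- ===== Notes on version B (the rewrite author's own statement) =====
-- stated objective: simpler
-- what changed: A deep-copies the whole dict twice and then deletes unwanted keys collected by two comprehensions; B builds the two result dicts in one select-then-copy pass over the items.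
import Mathlib
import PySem

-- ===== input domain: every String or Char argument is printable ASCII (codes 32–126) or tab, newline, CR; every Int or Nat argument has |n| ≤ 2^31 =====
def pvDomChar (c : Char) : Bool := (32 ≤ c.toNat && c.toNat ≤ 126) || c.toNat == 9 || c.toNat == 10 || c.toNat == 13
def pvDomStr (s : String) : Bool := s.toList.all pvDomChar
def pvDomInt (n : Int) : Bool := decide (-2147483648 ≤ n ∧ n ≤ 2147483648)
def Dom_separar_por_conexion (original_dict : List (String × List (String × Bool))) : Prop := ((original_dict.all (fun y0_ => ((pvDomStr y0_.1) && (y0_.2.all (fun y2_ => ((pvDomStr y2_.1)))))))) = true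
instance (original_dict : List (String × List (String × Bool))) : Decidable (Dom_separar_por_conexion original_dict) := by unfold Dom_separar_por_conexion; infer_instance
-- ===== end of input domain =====

-- B replaces A's copy-everything-then-delete-keys with one select-then-copy pass over the items (simpler).
-- Mutation note: neither version mutates its argument; equivalence is about the returned pair.

-- ===== PORT A =====

-- value.get('conexion') : first-match lookup in the inner dict (PySem.Dict semantics)
def pvGetConexion (v : List (String × Bool)) : Option Bool :=
  PySem.Dict.get? (PySem.Dict.mk v) "conexion"

-- del d[key] on the association list: remove the (unique) pair with that key
def pvDel (d : List (String × List (String × Bool))) (k : String) :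
    List (String × List (String × Bool)) :=
  d.eraseP (fun p => p.1 == k)

def separar_por_conexion (original_dict : List (String × List (String × Bool))) :
    (List (String × List (String × Bool))) × (List (String × List (String × Bool))) :=
  -- true_dict = deepcopy(original_dict); false_dict = deepcopy(original_dict)
  let true_dict := original_dict
  let false_dict := original_dict
  -- keys_to_remove_true / keys_to_remove_false (comprehensions over .items())
  let keys_to_remove_true :=
    (true_dict.filter (fun p => !(pvGetConexion p.2 == some true))).map (·.1)
  let keys_to_remove_false :=
    (false_dict.filter (fun p => !(pvGetConexion p.2 == some false))).map (·.1)
  -- the two deletion loops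
  let true_dict := keys_to_remove_true.foldl pvDel true_dict
  let false_dict := keys_to_remove_false.foldl pvDel false_dict
  (true_dict, false_dict)

-- ===== PORT B =====

def separar_por_conexion_alt (original_dict : List (String × List (String × Bool))) :
    (List (String × List (String × Bool))) × (List (String × List (String × Bool))) :=
  original_dict.foldl
    (fun acc p =>
      match pvGetConexion p.2 with
      | some true  => (acc.1 ++ [p], acc.2)
      | some false => (acc.1, acc.2 ++ [p])
      | none       => acc)
    ([], [])

-- ===== PRECONDITION & SPEC =====
-- Pre_ excludes association lists with duplicate outer keys: they cannot arise from a Python dict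
-- (A's argument is a dict), and A's delete-by-key and B's per-item pass treat them differently.
def Pre_separar_por_conexion (original_dict : List (String × List (String × Bool))) : Prop :=
  (original_dict.map Prod.fst).Nodup
instance (original_dict : List (String × List (String × Bool))) : Decidable (Pre_separar_por_conexion original_dict) := by unfold Pre_separar_por_conexion; infer_instance

def pvWitness_separar_por_conexion : (List (String × List (String × Bool))) :=
  [("a", [("conexion", true)]), ("b", [("conexion", false)]), ("c", [("x", true)])]

def Spec_separar_por_conexion (original_dict : List (String × List (String × Bool))) (out : (List (String × List (String × Bool))) × (List (String × List (String × Bool)))) : Prop := out = separar_por_conexion_alt original_dict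
instance (original_dict : List (String × List (String × Bool))) (out : (List (String × List (String × Bool))) × (List (String × List (String × Bool)))) : Decidable (Spec_separar_por_conexion original_dict out) := by unfold Spec_separar_por_conexion; infer_instance

-- ===== CLAIM (what is proved, stated in full; the proofs are below) =====
def Claim_equal_separar_por_conexion : Prop := ∀ (original_dict : List (String × List (String × Bool))), Dom_separar_por_conexion original_dict → Pre_separar_por_conexion original_dict → Spec_separar_por_conexion original_dict (separar_por_conexion original_dict)

-- ===== LEMMAS AND PROOFS =====

-- deleting a key not at the head passes over the head
theorem foldl_pvDel_cons_of_not_mem (ks : List String) (d : List (String × List (String × Bool)))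
    (k : String) (v : List (String × Bool)) (h : k ∉ ks) :
    ks.foldl pvDel ((k, v) :: d) = (k, v) :: ks.foldl pvDel d := by
  induction ks generalizing d with
  | nil => rfl
  | cons k' ks ih =>
    have hne : k ≠ k' := fun he => h (he ▸ List.mem_cons_self)
    have hstep : pvDel ((k, v) :: d) k' = (k, v) :: pvDel d k' := by
      simp [pvDel, List.eraseP_cons, hne]
    simp only [List.foldl_cons, hstep]
    exact ih (pvDel d k') (fun hm => h (List.mem_cons_of_mem _ hm))

-- A's delete loop, started from the keys of the items failing P, computes filter P
theorem foldl_pvDel_filter (P : (String × List (String × Bool)) → Bool)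
    (d : List (String × List (String × Bool))) (h : (d.map Prod.fst).Nodup) :
    ((d.filter (fun p => !(P p))).map (·.1)).foldl pvDel d = d.filter P := by
  induction d with
  | nil => rfl
  | cons p t ih =>
    obtain ⟨k, v⟩ := p
    simp only [List.map_cons, List.nodup_cons] at h
    obtain ⟨hk, hnd⟩ := h
    have hsub : ∀ x ∈ (t.filter (fun p => !(P p))).map (·.1), x ∈ t.map Prod.fst := by
      intro x hx
      obtain ⟨q, hq, rfl⟩ := List.mem_map.mp hx
      exact List.mem_map.mpr ⟨q, List.mem_of_mem_filter hq, rfl⟩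
    by_cases hP : P (k, v)
    · rw [show (((k, v) :: t).filter (fun p => !(P p))) = t.filter (fun p => !(P p)) from by
          simp [List.filter_cons, hP]]
      rw [foldl_pvDel_cons_of_not_mem _ t k v (fun hm => hk (hsub _ hm))]
      rw [ih hnd]
      simp [List.filter_cons, hP]
    · rw [show (((k, v) :: t).filter (fun p => !(P p)))
            = (k, v) :: t.filter (fun p => !(P p)) from by simp [List.filter_cons, hP]]
      simp only [List.map_cons, List.foldl_cons]
      have hdel : pvDel ((k, v) :: t) k = t := by simp [pvDel, List.eraseP_cons]
      rw [hdel, ih hnd]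
      simp [List.filter_cons, hP]

-- B's single pass computes the pair of filters
theorem alt_foldl_eq (d : List (String × List (String × Bool)))
    (acc : (List (String × List (String × Bool))) × (List (String × List (String × Bool)))) :
    d.foldl
      (fun acc p =>
        match pvGetConexion p.2 with
        | some true  => (acc.1 ++ [p], acc.2)
        | some false => (acc.1, acc.2 ++ [p])
        | none       => acc) acc
    = (acc.1 ++ d.filter (fun p => pvGetConexion p.2 == some true),
       acc.2 ++ d.filter (fun p => pvGetConexion p.2 == some false)) := by
  induction d generalizing acc with
  | nil => simp
  | cons p t ih =>
    simp only [List.foldl_cons]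
    cases hg : pvGetConexion p.2 with
    | none => simp [ih, hg]
    | some b => cases b <;> simp [ih, hg]

-- ===== VERDICT (by name: the statement is the Claim_ definition above) =====
theorem separar_por_conexion_spec : Claim_equal_separar_por_conexion := by
  intro d _ hpre
  unfold Spec_separar_por_conexion separar_por_conexion separar_por_conexion_alt
  rw [alt_foldl_eq d ([], [])]
  simp only [List.nil_append]
  refine Prod.ext ?_ ?_
  · exact foldl_pvDel_filter (fun p => pvGetConexion p.2 == some true) d hpre
  · exact foldl_pvDel_filter (fun p => pvGetConexion p.2 == some false) d hpre
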